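-- pv_equiv track=rewrite | github.com/che1745/campaign-review-app2 | test_upload.py | remove_duplicate_leads_with_status
-- ===== SOURCE A (Python) =====
-- def remove_duplicate_leads_with_status(leads_data):
--     """
--     Remove duplicate leads based on email address while preserving the LATEST email status
--     Returns unique leads and duplicate count
--     """
--     email_map = {}
--     duplicate_count = 0
--
--     for lead in leads_data:
--         email = lead.get('email', '').lower().strip()
--         if not email:
--             continue
--
--         if email in email_map:
--             # Duplicate found - keep the one with more recent/explicit status
--             existing_lead = email_map[email]
--
--             # Priority logic for preserving email status:
--             # 1. Manual email_status takes precedence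
--             # 2. If both have manual status, keep current
--             # 3. If neither has manual status, preserve external unsubscribe_status
--
--             current_email_status = lead.get('email_status')
--             existing_email_status = existing_lead.get('email_status')
--
--             if current_email_status and not existing_email_status:
--                 # Current has manual status, existing doesn't - use current
--                 email_map[email] = lead
--             elif not current_email_status and existing_email_status:
--                 # Existing has manual status, current doesn't - keep existing
--                 pass
--             elif current_email_status == 'unsubscribed' or existing_email_status == 'unsubscribed':
--                 # If either is manually unsubscribed, preserve that status
--                 if current_email_status == 'unsubscribed':
--                     email_map[email] = lead
--                 # else keep existing (which has unsubscribed status)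
--             else:
--                 # For other cases, use the current lead (most recent)
--                 email_map[email] = lead
--
--             duplicate_count += 1
--         else:
--             email_map[email] = lead
--
--     unique_leads = list(email_map.values())
--     return unique_leads, duplicate_count
-- ===== SOURCE B (Python) =====
-- def _choose(existing, current):
--     cs = current.get('email_status')
--     es = existing.get('email_status')
--     if cs and not es:
--         return current
--     if es and not cs:
--         return existing
--     if es == 'unsubscribed' and cs != 'unsubscribed':
--         return existing
--     return current
--
--
-- def remove_duplicate_leads_with_status(leads_data):
--     groups = {}
--     for lead in leads_data:
--         email = lead.get('email', '').lower().strip()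
--         if email:
--             groups.setdefault(email, []).append(lead)
--     unique_leads = []
--     duplicate_count = 0
--     for group in groups.values():
--         winner = group[0]
--         for lead in group[1:]:
--             winner = _choose(winner, lead)
--         unique_leads.append(winner)
--         duplicate_count += len(group) - 1
--     return unique_leads, duplicate_count
-- ===== Notes on version B (the rewrite author's own statement) =====
-- stated objective: alternative
-- what changed: B replaces A's running-winner dict (one dict entry overwritten in place per duplicate) by a two-pass group-and-fold: first group leads by normalized email preserving first-seen key order, then fold each group with a choose(existing,current) helper encoding the status-priority rule and count duplicates as sum(len(group)-1).
import Mathlib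
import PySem

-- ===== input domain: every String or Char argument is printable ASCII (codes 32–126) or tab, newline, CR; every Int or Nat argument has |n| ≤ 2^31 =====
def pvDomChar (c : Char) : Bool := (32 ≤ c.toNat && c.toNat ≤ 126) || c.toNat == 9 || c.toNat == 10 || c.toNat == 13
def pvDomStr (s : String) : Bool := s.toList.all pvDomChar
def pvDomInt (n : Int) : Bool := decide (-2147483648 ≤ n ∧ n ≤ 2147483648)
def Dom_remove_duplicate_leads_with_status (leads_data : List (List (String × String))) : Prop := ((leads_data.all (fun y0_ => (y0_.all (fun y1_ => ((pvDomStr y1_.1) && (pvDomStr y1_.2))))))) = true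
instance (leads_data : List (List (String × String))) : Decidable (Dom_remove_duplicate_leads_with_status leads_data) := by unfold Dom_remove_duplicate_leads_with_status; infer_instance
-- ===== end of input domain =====

-- B replaces A's running-winner dict with a group-by-email pass followed by a per-group
-- fold with a choose(existing,current) helper; same cost, different decomposition.


-- ===== PORT A =====
-- lead.get(k) on a Python dict (first match on the association list)
def pvLeadGet? (lead : List (String × String)) (k : String) : Option String :=
  (PySem.Dict.mk lead).get? k

-- lead.get('email', '').lower().strip()
def pvEmail (lead : List (String × String)) : String :=
  PySem.Str.strip (PySem.Str.lower ((pvLeadGet? lead "email").getD ""))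

-- Python truthiness of lead.get('email_status') (None or '' are falsy)
def pvTruthy (o : Option String) : Bool := (o.getD "") ≠ ""

-- one iteration of A's loop body
def pvStepA (st : PySem.Dict String (List (String × String)) × Int)
    (lead : List (String × String)) : PySem.Dict String (List (String × String)) × Int :=
  let email := pvEmail lead
  if email = "" then st
  else if st.1.contains email then
    let existing_lead := st.1.getD email []
    let cs := pvLeadGet? lead "email_status"
    let es := pvLeadGet? existing_lead "email_status"
    let email_map' :=
      if pvTruthy cs && !(pvTruthy es) then st.1.insert email lead
      else if !(pvTruthy cs) && pvTruthy es then st.1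
      else if cs = some "unsubscribed" ∨ es = some "unsubscribed" then
        (if cs = some "unsubscribed" then st.1.insert email lead else st.1)
      else st.1.insert email lead
    (email_map', st.2 + 1)
  else (st.1.insert email lead, st.2)

def remove_duplicate_leads_with_status (leads_data : List (List (String × String))) : (List (List (String × String))) × Int :=
  let st := leads_data.foldl pvStepA (PySem.Dict.empty, 0)
  (st.1.values, st.2)

-- ===== PORT B =====
-- _choose(existing, current) from Source B
def pvChoose (existing current : List (String × String)) : List (String × String) :=
  let cs := pvLeadGet? current "email_status"
  let es := pvLeadGet? existing "email_status"
  if pvTruthy cs && !(pvTruthy es) then current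
  else if pvTruthy es && !(pvTruthy cs) then existing
  else if es = some "unsubscribed" ∧ cs ≠ some "unsubscribed" then existing
  else current

-- first pass: groups.setdefault(email, []).append(lead)
def pvStepB (g : PySem.Dict String (List (List (String × String))))
    (lead : List (String × String)) : PySem.Dict String (List (List (String × String))) :=
  let email := pvEmail lead
  if email = "" then g
  else g.insert email (g.getD email [] ++ [lead])

-- second pass body: winner = fold of _choose over the group; count len(group)-1
def pvStepC (st : (List (List (String × String))) × Int)
    (group : List (List (String × String))) : (List (List (String × String))) × Int :=
  (st.1 ++ [(group.drop 1).foldl pvChoose (group.headD [])],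
   st.2 + ((group.length : Int) - 1))

def remove_duplicate_leads_with_status_alt (leads_data : List (List (String × String))) : (List (List (String × String))) × Int :=
  let groups := leads_data.foldl pvStepB PySem.Dict.empty
  let st := groups.values.foldl pvStepC ([], 0)
  (st.1, st.2)

-- ===== PRECONDITION & SPEC =====
def Spec_remove_duplicate_leads_with_status (leads_data : List (List (String × String))) (out : (List (List (String × String))) × Int) : Prop := out = remove_duplicate_leads_with_status_alt leads_data
instance (leads_data : List (List (String × String))) (out : (List (List (String × String))) × Int) : Decidable (Spec_remove_duplicate_leads_with_status leads_data out) := by unfold Spec_remove_duplicate_leads_with_status; infer_instance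

-- ===== CLAIM (what is proved, stated in full; the proofs are below) =====
def Claim_equal_remove_duplicate_leads_with_status : Prop := ∀ (leads_data : List (List (String × String))), Dom_remove_duplicate_leads_with_status leads_data → Spec_remove_duplicate_leads_with_status leads_data (remove_duplicate_leads_with_status leads_data)

-- ===== LEMMAS AND PROOFS =====

-- the winner of a group: B's inner fold as a function
def pvRed (gr : List (List (String × String))) : List (String × String) :=
  (gr.drop 1).foldl pvChoose (gr.headD [])

-- map pvRed over the values of a group dict
def pvMapVals (g : PySem.Dict String (List (List (String × String)))) :
    PySem.Dict String (List (String × String)) :=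
  PySem.Dict.mk (g.items.map (fun p => (p.1, pvRed p.2)))

-- total duplicate count of a group dict
def pvS (g : PySem.Dict String (List (List (String × String)))) : Int :=
  (g.items.map (fun p => ((p.2.length : Int) - 1))).sum

lemma pvChoose_nil (x : List (String × String)) : pvChoose [] x = x := by
  rw [pvChoose]
  rw [show pvLeadGet? [] "email_status" = none from rfl]
  simp only [pvTruthy, Option.getD_none]
  split_ifs with h1 h2 h3 <;> simp_all

lemma pvRed_append (gr : List (List (String × String))) (x : List (String × String)) :
    pvRed (gr ++ [x]) = pvChoose (pvRed gr) x := by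
  cases gr with
  | nil => simp [pvRed, pvChoose_nil]
  | cons h t => simp [pvRed, List.foldl_append]

lemma get?_mk_map (l : List (String × List (List (String × String)))) (k : String) :
    (PySem.Dict.mk (l.map (fun p => (p.1, pvRed p.2)))).get? k
      = ((PySem.Dict.mk l).get? k).map pvRed := by
  induction l with
  | nil => rfl
  | cons p t ih =>
      obtain ⟨a, b⟩ := p
      simp only [List.map_cons, PySem.Dict.get?_mk_cons]
      by_cases h : a == k <;> simp [h, ih]

lemma get?_pvMapVals (g : PySem.Dict String (List (List (String × String)))) (k : String) :
    (pvMapVals g).get? k = (g.get? k).map pvRed := by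
  have : PySem.Dict.mk g.items = g := rfl
  rw [pvMapVals, get?_mk_map, this]

lemma contains_pvMapVals (g : PySem.Dict String (List (List (String × String)))) (k : String) :
    (pvMapVals g).contains k = g.contains k := by
  rw [PySem.Dict.contains_eq_isSome_get?, PySem.Dict.contains_eq_isSome_get?, get?_pvMapVals]
  cases g.get? k <;> rfl

lemma keys_pvMapVals (g : PySem.Dict String (List (List (String × String)))) :
    (pvMapVals g).keys = g.keys := by
  show (g.items.map (fun p => (p.1, pvRed p.2))).map (·.1) = g.items.map (·.1)
  simp

-- insert with the key's current value is a no-op (Python 'pass' branch)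
lemma insert_get_self (d : PySem.Dict String (List (String × String))) (k : String)
    (v : List (String × String)) (hnd : d.keys.Nodup) (h : d.get? k = some v) :
    d.insert k v = d := by
  apply PySem.Dict.ext
  have hc : d.contains k = true := by
    rw [PySem.Dict.contains_eq_isSome_get?, h]; rfl
  rw [PySem.Dict.items_insert_of_contains d v hc]
  have hrw : ∀ p ∈ d.items, (if (p.1 == k) = true then (k, v) else p) = p := by
    intro p hp
    by_cases hpk : p.1 = k
    · have h1 : d.get? p.1 = some p.2 := PySem.Dict.get?_of_mem_items d hp hnd
      rw [hpk, h] at h1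
      obtain ⟨p1, p2⟩ := p
      simp only at hpk
      subst hpk
      simp only [beq_self_eq_true, if_true]
      exact congrArg _ (Option.some.inj h1)
    · simp [hpk]
  rw [List.map_congr_left hrw, List.map_id']

lemma pvMapVals_insert (g : PySem.Dict String (List (List (String × String))))
    (k : String) (v : List (List (String × String))) :
    pvMapVals (g.insert k v) = (pvMapVals g).insert k (pvRed v) := by
  apply PySem.Dict.ext
  show ((g.insert k v).items).map (fun p => (p.1, pvRed p.2)) = _
  by_cases hc : g.contains k = true
  · rw [PySem.Dict.items_insert_of_contains g v hc,
        PySem.Dict.items_insert_of_contains (pvMapVals g) (pvRed v)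
          (by rw [contains_pvMapVals]; exact hc)]
    show _ = (g.items.map (fun p => (p.1, pvRed p.2))).map _
    rw [List.map_map, List.map_map]
    apply List.map_congr_left
    intro p _
    by_cases hpk : p.1 = k <;> simp [hpk]
  · rw [PySem.Dict.items_insert_of_not_contains g v (by simpa using hc),
        PySem.Dict.items_insert_of_not_contains (pvMapVals g) (pvRed v)
          (by rw [contains_pvMapVals]; simpa using hc)]
    show _ = (g.items.map (fun p => (p.1, pvRed p.2))) ++ _
    simp

lemma sum_replace (l : List (String × List (List (String × String)))) (k : String)
    (gr w : List (List (String × String)))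
    (hnd : (l.map (·.1)).Nodup) (hmem : (k, gr) ∈ l) :
    ((l.map (fun p => if p.1 == k then (k, w) else p)).map
        (fun p => ((p.2.length : Int) - 1))).sum
      = (l.map (fun p => ((p.2.length : Int) - 1))).sum
          - ((gr.length : Int) - 1) + ((w.length : Int) - 1) := by
  induction l with
  | nil => simp at hmem
  | cons p t ih =>
      simp only [List.map_cons, List.nodup_cons] at hnd
      rcases List.mem_cons.mp hmem with h | h
      · subst h
        simp only [List.map_cons, BEq.rfl, if_true, List.sum_cons]
        have hrw : ∀ q ∈ t, (if (q.1 == k) = true then (k, w) else q) = q := by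
          intro q hq
          have hq1 : q.1 ∈ t.map (·.1) := List.mem_map_of_mem hq
          have hqk : q.1 ≠ k := fun hqk => hnd.1 (hqk ▸ hq1)
          simp [hqk]
        rw [List.map_congr_left hrw, List.map_id']
        ring
      · have hk1 : k ∈ t.map (·.1) := by
          have := List.mem_map_of_mem (f := (·.1)) h
          simpa using this
        have hpk : (p.1 == k) = false := by
          have : p.1 ≠ k := fun hpk => hnd.1 (hpk ▸ hk1)
          simpa using this
        simp only [List.map_cons, List.sum_cons, hpk, Bool.false_eq_true, if_false]
        rw [ih hnd.2 h]
        ring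

lemma pvS_insert_of_get (g : PySem.Dict String (List (List (String × String))))
    (k : String) (gr : List (List (String × String))) (l : List (String × String))
    (hnd : g.keys.Nodup) (h : g.get? k = some gr) :
    pvS (g.insert k (gr ++ [l])) = pvS g + 1 := by
  have hc : g.contains k = true := by rw [PySem.Dict.contains_eq_isSome_get?, h]; rfl
  rw [pvS, PySem.Dict.items_insert_of_contains g (gr ++ [l]) hc,
      sum_replace g.items k gr (gr ++ [l]) hnd (PySem.Dict.mem_items_of_get?_eq_some g h)]
  simp [pvS]; ring

lemma pvS_insert_of_not_contains (g : PySem.Dict String (List (List (String × String))))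
    (k : String) (l : List (String × String)) (hc : g.contains k = false) :
    pvS (g.insert k [l]) = pvS g := by
  rw [pvS, PySem.Dict.items_insert_of_not_contains g [l] hc]
  simp [pvS]

-- A's merge branch computes exactly insert of pvChoose
lemma stepA_merge (m : PySem.Dict String (List (String × String))) (e : String)
    (ex lead : List (String × String)) (hnd : m.keys.Nodup) (h : m.get? e = some ex) :
    (if pvTruthy (pvLeadGet? lead "email_status")
          && !(pvTruthy (pvLeadGet? ex "email_status")) then m.insert e lead
     else if !(pvTruthy (pvLeadGet? lead "email_status"))
          && pvTruthy (pvLeadGet? ex "email_status") then m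
     else if pvLeadGet? lead "email_status" = some "unsubscribed"
          ∨ pvLeadGet? ex "email_status" = some "unsubscribed" then
       (if pvLeadGet? lead "email_status" = some "unsubscribed" then m.insert e lead else m)
     else m.insert e lead)
    = m.insert e (pvChoose ex lead) := by
  have hkeep : m.insert e ex = m := insert_get_self m e ex hnd h
  rw [pvChoose]
  by_cases tc : (pvLeadGet? lead "email_status").getD "" = "" <;>
  by_cases te : (pvLeadGet? ex "email_status").getD "" = "" <;>
  by_cases uc : pvLeadGet? lead "email_status" = some "unsubscribed" <;>
  by_cases ue : pvLeadGet? ex "email_status" = some "unsubscribed" <;>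
    simp [pvTruthy, tc, te, uc, ue, hkeep]

-- the loop invariant: A's fold is the image of B's group fold
lemma loop_inv (leads : List (List (String × String)))
    (g : PySem.Dict String (List (List (String × String)))) (dc : Int)
    (hnd : g.keys.Nodup) :
    leads.foldl pvStepA (pvMapVals g, dc)
      = (pvMapVals (leads.foldl pvStepB g),
         dc + pvS (leads.foldl pvStepB g) - pvS g) := by
  induction leads generalizing g dc with
  | nil => simp
  | cons lead rest ih =>
      simp only [List.foldl_cons]
      by_cases he : pvEmail lead = ""
      · rw [show pvStepA (pvMapVals g, dc) lead = (pvMapVals g, dc) by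
              simp [pvStepA, he],
            show pvStepB g lead = g by simp [pvStepB, he]]
        exact ih g dc hnd
      · by_cases hc : g.contains (pvEmail lead) = true
        · obtain ⟨gr, hgr⟩ : ∃ gr, g.get? (pvEmail lead) = some gr := by
            rw [PySem.Dict.contains_eq_isSome_get?] at hc
            cases h : g.get? (pvEmail lead) with
            | none => rw [h] at hc; simp at hc
            | some gr => exact ⟨gr, rfl⟩
          have hgetm : (pvMapVals g).get? (pvEmail lead) = some (pvRed gr) := by
            rw [get?_pvMapVals, hgr]; rfl
          have hstepA : pvStepA (pvMapVals g, dc) lead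
              = ((pvMapVals g).insert (pvEmail lead) (pvChoose (pvRed gr) lead), dc + 1) := by
            rw [pvStepA]
            simp only [he, if_false, contains_pvMapVals, hc, if_true]
            rw [PySem.Dict.getD_of_get?_eq_some (pvMapVals g) [] hgetm]
            rw [stepA_merge (pvMapVals g) (pvEmail lead) (pvRed gr) lead
                  (by rw [keys_pvMapVals]; exact hnd) hgetm]
          have hstepB : pvStepB g lead
              = g.insert (pvEmail lead) (gr ++ [lead]) := by
            rw [pvStepB]
            simp only [he, if_false]
            rw [PySem.Dict.getD_of_get?_eq_some g [] hgr]
          rw [hstepA, hstepB,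
              show (pvMapVals g).insert (pvEmail lead) (pvChoose (pvRed gr) lead)
                  = pvMapVals (g.insert (pvEmail lead) (gr ++ [lead])) by
                rw [pvMapVals_insert, pvRed_append],
              ih _ _ (PySem.Dict.nodup_keys_insert _ _ _ hnd),
              pvS_insert_of_get g _ gr lead hnd hgr]
          ring_nf
        · have hc' : g.contains (pvEmail lead) = false := by simpa using hc
          have hstepA : pvStepA (pvMapVals g, dc) lead
              = ((pvMapVals g).insert (pvEmail lead) lead, dc) := by
            rw [pvStepA]
            simp [he, contains_pvMapVals, hc']
          have hstepB : pvStepB g lead = g.insert (pvEmail lead) [lead] := by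
            rw [pvStepB]
            simp only [he, if_false]
            rw [PySem.Dict.getD_of_not_contains g [] hc', List.nil_append]
          rw [hstepA, hstepB,
              show (pvMapVals g).insert (pvEmail lead) lead
                  = pvMapVals (g.insert (pvEmail lead) [lead]) by
                rw [pvMapVals_insert]; rfl,
              ih _ _ (PySem.Dict.nodup_keys_insert _ _ _ hnd),
              pvS_insert_of_not_contains g _ lead hc']

-- B's second pass computes map pvRed and the duplicate sum
lemma pass2 (vals : List (List (List (String × String))))
    (acc : (List (List (String × String))) × Int) :
    vals.foldl pvStepC acc
      = (acc.1 ++ vals.map pvRed,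
         acc.2 + (vals.map (fun gr => ((gr.length : Int) - 1))).sum) := by
  induction vals generalizing acc with
  | nil => simp
  | cons v t ih =>
      simp only [List.foldl_cons, List.map_cons, List.sum_cons]
      rw [ih]
      simp only [pvStepC, pvRed, Prod.mk.injEq]
      exact ⟨by simp, by ring⟩

-- ===== VERDICT (by name: the statement is the Claim_ definition above) =====
theorem remove_duplicate_leads_with_status_spec : Claim_equal_remove_duplicate_leads_with_status := by
  intro leads _
  show _ = _
  rw [remove_duplicate_leads_with_status, remove_duplicate_leads_with_status_alt]
  have h0 : (PySem.Dict.empty : PySem.Dict String (List (String × String)))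
      = pvMapVals PySem.Dict.empty := rfl
  rw [h0, loop_inv leads PySem.Dict.empty 0 PySem.Dict.nodup_keys_empty]
  rw [pass2]
  set G := leads.foldl pvStepB PySem.Dict.empty
  have hvals : (pvMapVals G).values = G.values.map pvRed := by
    show (G.items.map (fun p => (p.1, pvRed p.2))).map (·.2)
        = (G.items.map (·.2)).map pvRed
    simp
  have hsum : (G.values.map (fun gr => ((gr.length : Int) - 1))).sum = pvS G := by
    show ((G.items.map (·.2)).map (fun gr => ((gr.length : Int) - 1))).sum = _
    rw [List.map_map]; rfl
  simp [hvals, hsum, pvS, PySem.Dict.empty]
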